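-- pv_equiv track=rewrite | github.com/MadSkittles/Router-Maestro | src/router_maestro/utils/reasoning.py | budget_to_effort
-- ===== SOURCE A (Python) =====
-- EFFORT_TO_BUDGET: dict[str, int] = {
--     "low": 4096,
--     "medium": 8192,
--     "high": 16384,
--     "xhigh": 24000,
-- }
--
-- def budget_to_effort(budget: int | None) -> str | None:
--     """Approximate inverse mapping.
--
--     Picks the highest defined effort whose budget is ≤ the requested one.
--     Returns ``None`` when ``budget`` is ``None`` or below the smallest tier.
--     """
--     if budget is None:
--         return None
--     best: str | None = None
--     best_val = -1
--     for name, val in EFFORT_TO_BUDGET.items():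
--         if val <= budget and val > best_val:
--             best, best_val = name, val
--     return best
-- ===== SOURCE B (Python) =====
-- import bisect
--
-- _THRESHOLDS = [4096, 8192, 16384, 24000]
-- _NAMES = ["low", "medium", "high", "xhigh"]
--
-- def budget_to_effort(budget):
--     if budget is None:
--         return None
--     k = bisect.bisect_right(_THRESHOLDS, budget)
--     return None if k == 0 else _NAMES[k - 1]
-- ===== Notes on version B (the rewrite author's own statement) =====
-- stated objective: idiomatic
-- what changed: Replaces the max-tracking linear scan over the dict with a bisect_right binary search on a sorted threshold list paired with a parallel name list.
import Mathlib
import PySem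

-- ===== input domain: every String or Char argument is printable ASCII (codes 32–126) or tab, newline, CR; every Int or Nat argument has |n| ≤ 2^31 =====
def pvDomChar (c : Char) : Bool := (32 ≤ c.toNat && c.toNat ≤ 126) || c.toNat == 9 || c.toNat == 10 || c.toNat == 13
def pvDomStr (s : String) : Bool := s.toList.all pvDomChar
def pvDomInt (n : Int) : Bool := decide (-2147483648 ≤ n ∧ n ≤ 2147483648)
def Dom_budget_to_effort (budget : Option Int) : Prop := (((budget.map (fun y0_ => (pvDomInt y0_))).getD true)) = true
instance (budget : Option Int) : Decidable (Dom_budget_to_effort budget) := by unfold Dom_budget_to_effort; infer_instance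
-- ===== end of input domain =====

-- B replaces A's max-tracking linear scan over the dict with a bisect_right binary search
-- over a sorted threshold list and a parallel name list (idiomatic; same return value).


-- ===== PORT A =====
-- EFFORT_TO_BUDGET as an insertion-ordered association list (PySem dict convention)
def EFFORT_TO_BUDGET : List (String × Int) :=
  [("low", 4096), ("medium", 8192), ("high", 16384), ("xhigh", 24000)]

def budget_to_effort (budget : Option Int) : Option String :=
  match budget with
  | none => none
  | some b =>
    let st := EFFORT_TO_BUDGET.foldl
      (fun (acc : Option String × Int) nv =>
        if nv.2 ≤ b ∧ nv.2 > acc.2 then (some nv.1, nv.2) else acc)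
      (none, -1)
    st.1

-- ===== PORT B =====
def pvThresholds : List Int := [4096, 8192, 16384, 24000]
def pvNames : List String := ["low", "medium", "high", "xhigh"]

-- bisect.bisect_right, transliterated as the standard binary search on [lo, hi)
def pvBisectRight (xs : List Int) (x : Int) (lo hi : Nat) : Nat :=
  if _h : lo < hi then
    let mid := (lo + hi) / 2
    if x < xs.getD mid 0 then pvBisectRight xs x lo mid
    else pvBisectRight xs x (mid + 1) hi
  else lo
termination_by hi - lo
decreasing_by all_goals omega

def budget_to_effort_alt (budget : Option Int) : Option String :=
  match budget with
  | none => none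
  | some b =>
    let k := pvBisectRight pvThresholds b 0 pvThresholds.length
    -- _NAMES[k-1]: k-1 is in range whenever k ≠ 0, so plain getD is exact here
    if k = 0 then none else some (pvNames.getD (k - 1) "")

-- ===== PRECONDITION & SPEC =====
def Spec_budget_to_effort (budget : Option Int) (out : Option String) : Prop := out = budget_to_effort_alt budget
instance (budget : Option Int) (out : Option String) : Decidable (Spec_budget_to_effort budget out) := by unfold Spec_budget_to_effort; infer_instance

-- ===== CLAIM (what is proved, stated in full; the proofs are below) =====
def Claim_equal_budget_to_effort : Prop := ∀ (budget : Option Int), Dom_budget_to_effort budget → Spec_budget_to_effort budget (budget_to_effort budget)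

-- ===== LEMMAS AND PROOFS =====
theorem bisect_eval (b : Int) :
    pvBisectRight pvThresholds b 0 4 =
      if b < 4096 then 0 else if b < 8192 then 1 else if b < 16384 then 2
      else if b < 24000 then 3 else 4 := by
  rw [pvBisectRight]
  simp only [pvThresholds]
  norm_num
  split_ifs <;>
    (rw [pvBisectRight]; norm_num <;> split_ifs <;>
      first
      | rfl
      | (rw [pvBisectRight]; norm_num <;> split_ifs <;>
          first | rfl | (rw [pvBisectRight]; norm_num) | omega)
      | omega) <;> omega

-- ===== VERDICT (by name: the statement is the Claim_ definition above) =====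
set_option maxHeartbeats 1000000 in
theorem budget_to_effort_spec : Claim_equal_budget_to_effort := by
  intro budget _
  unfold Spec_budget_to_effort budget_to_effort budget_to_effort_alt
  cases budget with
  | none => rfl
  | some b =>
    have hl : pvThresholds.length = 4 := rfl
    simp only [EFFORT_TO_BUDGET, List.foldl, hl, bisect_eval]
    rcases lt_or_ge b 4096 with h1 | h1
    · have a1 : ¬ (4096:Int) ≤ b := by omega
      have a2 : ¬ (8192:Int) ≤ b := by omega
      have a3 : ¬ (16384:Int) ≤ b := by omega
      have a4 : ¬ (24000:Int) ≤ b := by omega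
      simp [a1, a2, a3, a4, h1]
    rcases lt_or_ge b 8192 with h2 | h2
    · have a2 : ¬ (8192:Int) ≤ b := by omega
      have a3 : ¬ (16384:Int) ≤ b := by omega
      have a4 : ¬ (24000:Int) ≤ b := by omega
      simp [pvNames, h1, a2, a3, a4, h2, not_lt.mpr h1]
    rcases lt_or_ge b 16384 with h3 | h3
    · have a3 : ¬ (16384:Int) ≤ b := by omega
      have a4 : ¬ (24000:Int) ≤ b := by omega
      simp [pvNames, h1, h2, a3, a4, h3, not_lt.mpr h1, not_lt.mpr h2]
    rcases lt_or_ge b 24000 with h4 | h4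
    · have a4 : ¬ (24000:Int) ≤ b := by omega
      simp [pvNames, h1, h2, h3, a4, h4, not_lt.mpr h1, not_lt.mpr h2, not_lt.mpr h3]
    · simp [pvNames, h1, h2, h3, h4, not_lt.mpr h1, not_lt.mpr h2, not_lt.mpr h3, not_lt.mpr h4]
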